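-- pv_equiv track=rewrite | github.com/xiangli-sophgo/CrossRing | scripts/tools/different_topo_runner.py | is_matching_topology
-- ===== SOURCE A (Python) =====
-- def is_matching_topology(filename, topo_name):
--     """检查文件名是否与指定拓扑匹配"""
--     filename_lower = filename.lower()
--     topo_lower = topo_name.lower()
--
--     # 直接包含拓扑名称 (如: traffic_3x3_case1.txt)
--     if topo_lower in filename_lower:
--         return True
--
--     # 提取拓扑的行列数
--     rows, cols = map(int, topo_name.split("x"))
--
--     # 检查各种可能的格式
--     patterns = [
--         f"{rows}x{cols}",  # 3x3
--         f"{rows}X{cols}",  # 3X3 (大写X)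
--         f"{rows}_{cols}",  # 3_3 (下划线)
--         f"{rows}-{cols}",  # 3-3 (连字符)
--         f"_{rows}x{cols}_",  # _3x3_
--         f"_{rows}X{cols}_",  # _3X3_
--         f"-{rows}x{cols}-",  # -3x3-
--         f"-{rows}X{cols}-",  # -3X3-
--     ]
--
--     for pattern in patterns:
--         if pattern in filename_lower:
--             return True
--
--     return False
-- ===== SOURCE B (Python) =====
-- def is_matching_topology(filename, topo_name):
--     """检查文件名是否与指定拓扑匹配"""
--     filename_lower = filename.lower()
--
--     # 直接包含拓扑名称 (如: traffic_3x3_case1.txt)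
--     if topo_name.lower() in filename_lower:
--         return True
--
--     # 提取拓扑的行列数 (名称格式非法时同样抛出 ValueError)
--     rows, cols = map(int, topo_name.split("x"))
--     r, c = str(rows), str(cols)
--
--     # 单趟位置扫描: 在每个起点检查 "行数 分隔符 列数" 是否恰好从这里开始.
--     # 小写化后大写 X 永远不出现, 而 _RxC_/-RxC- 包含裸 RxC, 故分隔符 x/_/- 即覆盖全部模式.
--     for i in range(len(filename_lower) - len(r) - len(c)):
--         j = i + len(r)
--         if (filename_lower[i:j] == r
--                 and filename_lower[j] in "x_-"
--                 and filename_lower[j + 1 : j + 1 + len(c)] == c):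
--             return True
--     return False
-- ===== Notes on version B (the rewrite author's own statement) =====
-- stated objective: alternative
-- what changed: Replaces A's 8-pattern list and per-pattern substring scans by a single left-to-right positional scan of the filename that at each start index checks rows-digits, then one separator out of x/_/-, then cols-digits (uppercase-X patterns can never occur in the lowercased filename and the wrapped _RxC_/-RxC- patterns are redundant).
import Mathlib
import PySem

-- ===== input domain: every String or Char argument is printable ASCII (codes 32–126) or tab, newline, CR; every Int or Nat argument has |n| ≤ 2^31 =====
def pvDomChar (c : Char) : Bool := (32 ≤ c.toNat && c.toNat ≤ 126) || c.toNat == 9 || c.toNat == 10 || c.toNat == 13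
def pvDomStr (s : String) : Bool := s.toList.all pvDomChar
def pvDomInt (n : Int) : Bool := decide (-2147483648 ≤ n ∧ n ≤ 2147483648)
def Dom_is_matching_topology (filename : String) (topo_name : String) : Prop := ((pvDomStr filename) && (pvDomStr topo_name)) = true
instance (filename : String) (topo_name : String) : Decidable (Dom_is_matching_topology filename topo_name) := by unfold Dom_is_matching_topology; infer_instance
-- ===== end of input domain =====

-- B replaces A's 8-pattern list and per-pattern substring scans by a single positional scan of the
-- filename checking rows-digits / one separator of x,_,- / cols-digits at each start index: an
-- alternative algorithm with the same behaviour (A raises ValueError outside Pre_, and so does B).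


-- shared helper: `rows, cols = map(int, topo_name.split("x"))` — `none` exactly where Python raises ValueError
def pvParseTopo (topo_name : String) : Option (Int × Int) :=
  match PySem.Str.split? topo_name "x" with
  | some [a, b] =>
    match PySem.Int.ofStr? a, PySem.Int.ofStr? b with
    | some r, some c => some (r, c)
    | _, _ => none
  | _ => none

-- ===== PORT A =====
def is_matching_topology (filename : String) (topo_name : String) : Bool :=
  let filename_lower := PySem.Chars.lower filename.toList
  let topo_lower := PySem.Chars.lower topo_name.toList
  if PySem.Chars.isIn topo_lower filename_lower then true
  else
    match pvParseTopo topo_name with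
    | none => false  -- Python raises ValueError here; excluded by Pre_
    | some (rows, cols) =>
      let rs := PySem.Int.toChars rows
      let cs := PySem.Int.toChars cols
      let patterns : List (List Char) :=
        [rs ++ ['x'] ++ cs, rs ++ ['X'] ++ cs, rs ++ ['_'] ++ cs, rs ++ ['-'] ++ cs,
         ['_'] ++ rs ++ ['x'] ++ cs ++ ['_'], ['_'] ++ rs ++ ['X'] ++ cs ++ ['_'],
         ['-'] ++ rs ++ ['x'] ++ cs ++ ['-'], ['-'] ++ rs ++ ['X'] ++ cs ++ ['-']]
      patterns.any (fun p => PySem.Chars.isIn p filename_lower)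

-- ===== PORT B =====
def is_matching_topology_alt (filename : String) (topo_name : String) : Bool :=
  let filename_lower := PySem.Chars.lower filename.toList
  if PySem.Chars.isIn (PySem.Chars.lower topo_name.toList) filename_lower then true
  else
    match pvParseTopo topo_name with
    | none => false  -- Python raises ValueError here; excluded by Pre_
    | some (rows, cols) =>
      let r := PySem.Int.toChars rows
      let c := PySem.Int.toChars cols
      -- for i in range(len(filename_lower) - len(r) - len(c)): …
      (PySem.List.pyRange 0 ((filename_lower.length : Int) - r.length - c.length) 1).any (fun i =>
        let j := i + (r.length : Int)
        (PySem.List.slice filename_lower (some i) (some j) == r)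
        && (match PySem.List.pyGet? filename_lower j with
            | some ch => PySem.Chars.isIn [ch] ['x', '_', '-']   -- filename_lower[j] in "x_-"
            | none => false)
        && (PySem.List.slice filename_lower (some (j + 1)) (some (j + 1 + (c.length : Int))) == c))

-- ===== PRECONDITION & SPEC =====
-- Pre_ excludes exactly the inputs where the Python raises ValueError: the first substring guard fails
-- and topo_name does not split on "x" into exactly two int()-parseable parts (both A and B raise there).
def Pre_is_matching_topology (filename : String) (topo_name : String) : Prop :=
  PySem.Chars.isIn (PySem.Chars.lower topo_name.toList) (PySem.Chars.lower filename.toList) = true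
  ∨ (pvParseTopo topo_name).isSome = true
instance (filename : String) (topo_name : String) : Decidable (Pre_is_matching_topology filename topo_name) := by unfold Pre_is_matching_topology; infer_instance

def pvWitness_is_matching_topology : String × String := ("traffic_3x3_case1.txt", "3x3")

def Spec_is_matching_topology (filename : String) (topo_name : String) (out : Bool) : Prop := out = is_matching_topology_alt filename topo_name
instance (filename : String) (topo_name : String) (out : Bool) : Decidable (Spec_is_matching_topology filename topo_name out) := by unfold Spec_is_matching_topology; infer_instance

-- ===== CLAIM (what is proved, stated in full; the proofs are below) =====
def Claim_equal_is_matching_topology : Prop := ∀ (filename : String) (topo_name : String), Dom_is_matching_topology filename topo_name → Pre_is_matching_topology filename topo_name → Spec_is_matching_topology filename topo_name (is_matching_topology filename topo_name)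

-- ===== LEMMAS AND PROOFS =====

-- a lowercased string never contains an uppercase 'X'
theorem pv_lowerChar_ne_X (c : Char) : PySem.Chars.lowerChar c ≠ 'X' := by
  unfold PySem.Chars.lowerChar PySem.Chars.isupper
  split_ifs with h
  · intro hc
    have h2 : (65 ≤ c.toNat ∧ c.toNat ≤ 90) := by simpa using h
    have ht : (Char.ofNat (c.toNat + 32)).toNat = c.toNat + 32 := by
      rw [Char.toNat_ofNat]
      have hv : (c.toNat + 32).isValidChar := by left; omega
      simp [hv]
    have := congrArg Char.toNat hc
    rw [ht] at this
    have hx : ('X').toNat = 88 := by decide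
    omega
  · intro hc; subst hc; simp at h

-- a pattern containing 'X' is never a substring of a lowercased string
theorem pv_isIn_lower_false_of_memX (p : List Char) (s : List Char) (h : 'X' ∈ p) :
    PySem.Chars.isIn p (PySem.Chars.lower s) = false := by
  rw [PySem.Chars.isIn_eq_false_iff]
  intro hinf
  have hmem : 'X' ∈ PySem.Chars.lower s := hinf.subset h
  unfold PySem.Chars.lower at hmem
  rcases List.mem_map.mp hmem with ⟨c, _, hc⟩
  exact pv_lowerChar_ne_X c hc

-- a wrapped pattern being a substring implies the bare pattern is one too
theorem pv_isIn_of_isIn_wrap (a p b fl : List Char)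
    (h : PySem.Chars.isIn (a ++ p ++ b) fl = true) : PySem.Chars.isIn p fl = true := by
  rw [PySem.Chars.isIn_iff_infix] at h ⊢
  exact List.IsInfix.trans ⟨a, b, rfl⟩ h

-- singleton containment is membership
theorem pv_isIn_singleton (a : Char) (l : List Char) :
    PySem.Chars.isIn [a] l = true ↔ a ∈ l := by
  rw [PySem.Chars.isIn_iff_infix]
  constructor
  · intro h; exact h.subset (List.mem_singleton_self a)
  · intro h
    rcases List.append_of_mem h with ⟨s, t, rfl⟩
    exact ⟨s, t, by simp⟩

-- the element just past a prefix r
theorem pv_getElem_mid (r rest : List Char) (x : Char) : (r ++ x :: rest)[r.length]? = some x := by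
  induction r with
  | nil => simp
  | cons a r ih => simpa using ih

theorem pv_drop_mid (r rest : List Char) (x : Char) : (r ++ x :: rest).drop (r.length + 1) = rest := by
  induction r with
  | nil => simp
  | cons a r ih => simp [ih]

-- decomposition of 'r ++ sep :: c is a prefix of d' into the three positional checks B performs
theorem pv_prefix_decomp (d r c : List Char) (sep : Char) :
    (r ++ sep :: c) <+: d ↔
      (d.take r.length = r ∧ d[r.length]? = some sep ∧ (d.drop (r.length + 1)).take c.length = c) := by
  constructor
  · rintro ⟨t, ht⟩
    have ht' : d = r ++ sep :: (c ++ t) := by rw [← ht]; simp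
    subst ht'
    refine ⟨by simp, pv_getElem_mid r (c ++ t) sep, ?_⟩
    rw [pv_drop_mid]
    simp
  · rintro ⟨h1, h2, h3⟩
    have hlt : r.length < d.length := (List.getElem?_eq_some_iff.mp h2).1
    refine ⟨(d.drop (r.length + 1)).drop c.length, ?_⟩
    have hd : d.drop r.length = sep :: d.drop (r.length + 1) := by
      rw [List.drop_eq_getElem_cons hlt]
      have hg := List.getElem?_eq_getElem hlt
      rw [hg] at h2
      simp at h2
      simp [h2]
    have : d = d.take r.length ++ d.drop r.length := (List.take_append_drop _ _).symm
    calc (r ++ sep :: c) ++ (d.drop (r.length + 1)).drop c.length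
        = r ++ sep :: ((d.drop (r.length + 1)).take c.length ++ (d.drop (r.length + 1)).drop c.length) := by
          rw [h3]; simp
      _ = r ++ (sep :: d.drop (r.length + 1)) := by rw [List.take_append_drop]
      _ = d.take r.length ++ d.drop r.length := by rw [h1, hd]
      _ = d := List.take_append_drop _ _

-- B's positional scan accepts iff some pattern r ++ sep :: c with sep ∈ {x,_,-} is a substring
theorem pv_scan_iff (fl r c : List Char) :
    ((PySem.List.pyRange 0 ((fl.length : Int) - r.length - c.length) 1).any (fun i =>
        let j := i + (r.length : Int)
        (PySem.List.slice fl (some i) (some j) == r)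
        && (match PySem.List.pyGet? fl j with
            | some ch => PySem.Chars.isIn [ch] ['x', '_', '-']
            | none => false)
        && (PySem.List.slice fl (some (j + 1)) (some (j + 1 + (c.length : Int))) == c)) = true)
    ↔ (∃ sep ∈ ['x', '_', '-'], PySem.Chars.isIn (r ++ sep :: c) fl = true) := by
  rw [List.any_eq_true]
  constructor
  · rintro ⟨i, hi, hcond⟩
    rw [PySem.List.mem_pyRange_one] at hi
    obtain ⟨j, rfl⟩ := Int.eq_ofNat_of_zero_le hi.1
    simp only [Bool.and_eq_true, beq_iff_eq] at hcond
    obtain ⟨⟨hslice1, hget⟩, hslice2⟩ := hcond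
    rcases hg : PySem.List.pyGet? fl ((j : Int) + (r.length : Int)) with _ | ch
    · rw [hg] at hget; exact absurd hget (by simp)
    · rw [hg] at hget
      have hsep : ch ∈ ['x', '_', '-'] := (pv_isIn_singleton ch _).mp hget
      refine ⟨ch, hsep, ?_⟩
      rw [← PySem.Chars.exists_prefix_drop_iff_isIn]
      refine ⟨j, (pv_prefix_decomp _ r c ch).mpr ⟨?_, ?_, ?_⟩⟩
      · rw [PySem.List.slice_natCast_add] at hslice1
        simpa using hslice1
      · have : ((j : Int) + (r.length : Int)) = ((j + r.length : Nat) : Int) := by omega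
        rw [this, PySem.List.pyGet?_natCast] at hg
        rw [List.getElem?_drop]
        exact hg
      · have h2 : ((j : Int) + (r.length : Int) + 1) = ((j + r.length + 1 : Nat) : Int) := by omega
        rw [h2, PySem.List.slice_natCast_add] at hslice2
        have hb : List.drop (r.length + 1) (List.drop j fl) = List.drop (j + r.length + 1) fl := by
          rw [List.drop_drop]; congr 1
        rw [hb]
        exact hslice2
  · rintro ⟨sep, hsep, hin⟩
    rw [← PySem.Chars.exists_prefix_drop_iff_isIn] at hin
    obtain ⟨j, hpre⟩ := hin
    have hlen : r.length + (c.length + 1) ≤ fl.length - j := by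
      have := hpre.length_le
      simpa using this
    have hjlt : j + r.length + c.length < fl.length := by omega
    obtain ⟨h1, h2, h3⟩ := (pv_prefix_decomp _ r c sep).mp hpre
    refine ⟨(j : Int), ?_, ?_⟩
    · rw [PySem.List.mem_pyRange_one]
      constructor
      · exact Int.natCast_nonneg j
      · omega
    · simp only [Bool.and_eq_true, beq_iff_eq]
      refine ⟨⟨?_, ?_⟩, ?_⟩
      · rw [PySem.List.slice_natCast_add]; simpa using h1
      · have : ((j : Int) + (r.length : Int)) = ((j + r.length : Nat) : Int) := by omega
        rw [this, PySem.List.pyGet?_natCast]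
        rw [List.getElem?_drop] at h2
        rw [h2]
        exact (pv_isIn_singleton sep _).mpr hsep
      · have h2' : ((j : Int) + (r.length : Int) + 1) = ((j + r.length + 1 : Nat) : Int) := by omega
        rw [h2', PySem.List.slice_natCast_add]
        have hb : List.drop (r.length + 1) (List.drop j fl) = List.drop (j + r.length + 1) fl := by
          rw [List.drop_drop]; congr 1
        rw [← hb]
        exact h3

theorem pv_agree : ∀ (filename : String) (topo_name : String), Pre_is_matching_topology filename topo_name → is_matching_topology filename topo_name = is_matching_topology_alt filename topo_name := by
  intro filename topo_name hpre
  unfold is_matching_topology is_matching_topology_alt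
  by_cases hin : PySem.Chars.isIn (PySem.Chars.lower topo_name.toList) (PySem.Chars.lower filename.toList) = true
  · simp [hin]
  · simp only [hin, Bool.false_eq_true, if_false]
    rcases hpre with hpre | hpre
    · exact absurd hpre hin
    · rcases hsome : pvParseTopo topo_name with _ | ⟨rows, cols⟩
      · simp [hsome] at hpre
      · dsimp only
        set fl := PySem.Chars.lower filename.toList with hfl
        set rs := PySem.Int.toChars rows
        set cs := PySem.Int.toChars cols
        have h4 : PySem.Chars.isIn (['_'] ++ rs ++ ['x'] ++ cs ++ ['_']) fl = true →
            PySem.Chars.isIn (rs ++ ['x'] ++ cs) fl = true := by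
          intro hh
          apply pv_isIn_of_isIn_wrap ['_'] _ ['_']
          simpa [List.append_assoc] using hh
        have h6 : PySem.Chars.isIn (['-'] ++ rs ++ ['x'] ++ cs ++ ['-']) fl = true →
            PySem.Chars.isIn (rs ++ ['x'] ++ cs) fl = true := by
          intro hh
          apply pv_isIn_of_isIn_wrap ['-'] _ ['-']
          simpa [List.append_assoc] using hh
        have hX1 := pv_isIn_lower_false_of_memX (rs ++ ['X'] ++ cs) filename.toList (by simp)
        have hX2 := pv_isIn_lower_false_of_memX (['_'] ++ rs ++ ['X'] ++ cs ++ ['_']) filename.toList (by simp)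
        have hX3 := pv_isIn_lower_false_of_memX (['-'] ++ rs ++ ['X'] ++ cs ++ ['-']) filename.toList (by simp)
        rw [← hfl] at hX1 hX2 hX3
        rw [Bool.eq_iff_iff, pv_scan_iff fl rs cs]
        simp only [List.any_cons, List.any_nil, Bool.or_false, hX1, hX2, hX3, Bool.false_or,
          Bool.or_eq_true]
        constructor
        · rintro (h|h|h|h|h)
          · exact ⟨'x', by simp, by simpa [List.append_assoc] using h⟩
          · exact ⟨'_', by simp, by simpa [List.append_assoc] using h⟩
          · exact ⟨'-', by simp, by simpa [List.append_assoc] using h⟩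
          · exact ⟨'x', by simp, by simpa [List.append_assoc] using h4 h⟩
          · exact ⟨'x', by simp, by simpa [List.append_assoc] using h6 h⟩
        · rintro ⟨sep, hsep, h⟩
          simp only [List.mem_cons, List.not_mem_nil, or_false] at hsep
          rcases hsep with rfl | rfl | rfl
          · exact Or.inl (by simpa [List.append_assoc] using h)
          · exact Or.inr (Or.inl (by simpa [List.append_assoc] using h))
          · exact Or.inr (Or.inr (Or.inl (by simpa [List.append_assoc] using h)))

-- ===== VERDICT (by name: the statement is the Claim_ definition above) =====
theorem is_matching_topology_spec : Claim_equal_is_matching_topology := by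
  intro filename topo_name _ hpre
  unfold Spec_is_matching_topology
  exact pv_agree filename topo_name hpre
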